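-- pv_equiv track=rewrite | github.com/yebeike/NeSy-Edge | experiments/thesis_rebuild_20260315/rq34/scripts/build_rq3_small_v2_benchmark_20260318.py | _compact_lines
-- ===== SOURCE A (Python) =====
-- from typing import Dict, Iterable, List, Mapping, MutableMapping, Sequence, Tuple
--
-- def _compact_lines(lines: Sequence[str], max_chars: int) -> str:
--     kept: List[str] = []
--     total_chars = 0
--     for line in lines:
--         text = str(line or "").strip()
--         if not text or text in kept:
--             continue
--         extra = len(text) + (1 if kept else 0)
--         if kept and total_chars + extra > max_chars:
--             break
--         kept.append(text)
--         total_chars += extra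
--     return "\n".join(kept)
-- ===== SOURCE B (Python) =====
-- def _compact_lines(lines, max_chars):
--     # Pass 1: normalize, drop empties, dedup (order-preserving, seen-set).
--     unique = []
--     seen = set()
--     for line in lines:
--         text = str(line or "").strip()
--         if text and text not in seen:
--             seen.add(text)
--             unique.append(text)
--     # Pass 2: greedy accumulation under the char budget.
--     result = []
--     total = 0
--     for text in unique:
--         extra = len(text) + (1 if result else 0)
--         if result and total + extra > max_chars:
--             break
--         result.append(text)
--         total += extra
--     return "\n".join(result)
-- ===== Notes on version B (the rewrite author's own statement) =====
-- stated objective: alternative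
-- what changed: Split A's single interleaved loop into two passes: an order-preserving dedup pass with a hash set (replacing A's 'text in kept' list scan) followed by a separate greedy budget pass.
import Mathlib
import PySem

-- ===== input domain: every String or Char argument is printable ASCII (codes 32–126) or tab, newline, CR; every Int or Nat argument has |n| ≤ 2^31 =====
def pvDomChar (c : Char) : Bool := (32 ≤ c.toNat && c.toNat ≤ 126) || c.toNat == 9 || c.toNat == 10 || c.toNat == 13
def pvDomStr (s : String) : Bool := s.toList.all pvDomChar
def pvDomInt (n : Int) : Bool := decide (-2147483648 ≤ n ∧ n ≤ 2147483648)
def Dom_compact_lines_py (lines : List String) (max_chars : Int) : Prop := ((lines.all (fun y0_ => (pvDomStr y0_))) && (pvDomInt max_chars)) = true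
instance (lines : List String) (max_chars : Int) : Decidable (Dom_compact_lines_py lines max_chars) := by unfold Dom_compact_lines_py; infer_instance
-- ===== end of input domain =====

-- B replaces A's single interleaved loop by two distinct passes (seen-set dedup, then greedy
-- budget accumulation with break); same return value, objective: alternative decomposition.

-- ===== PORT A =====
-- A's single loop: state (kept, total_chars); 'break' = return kept.
def pvALoop (max_chars : Int) : List String → List String → Int → List String
  | [], kept, _ => kept
  | l :: rest, kept, total =>
    let text := PySem.Str.strip (if l == "" then "" else l)   -- str(line or "").strip()
    if text == "" || kept.contains text then pvALoop max_chars rest kept total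
    else
      let extra : Int := PySem.Str.len text + (if kept.isEmpty then 0 else 1)
      if !kept.isEmpty && decide (total + extra > max_chars) then kept
      else pvALoop max_chars rest (kept ++ [text]) (total + extra)

def compact_lines_py (lines : List String) (max_chars : Int) : String :=
  PySem.Str.join "\n" (pvALoop max_chars lines [] 0)

-- ===== PORT B =====
-- B pass 1: order-preserving dedup over normalized non-empty lines, with a seen-set.
def pvBDedup (seen : PySem.Set String) (unique : List String) : List String → List String
  | [] => unique
  | l :: rest =>
    let text := PySem.Str.strip (if l == "" then "" else l)   -- str(line or "").strip()
    if text != "" && !(PySem.Set.contains seen text) then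
      pvBDedup (PySem.Set.add seen text) (unique ++ [text]) rest
    else pvBDedup seen unique rest

-- B pass 2: greedy accumulation under the char budget ('break' = return result).
def pvBGreedy (max_chars : Int) : List String → List String → Int → List String
  | [], result, _ => result
  | t :: rest, result, total =>
    let extra : Int := PySem.Str.len t + (if result.isEmpty then 0 else 1)
    if !result.isEmpty && decide (total + extra > max_chars) then result
    else pvBGreedy max_chars rest (result ++ [t]) (total + extra)

def compact_lines_py_alt (lines : List String) (max_chars : Int) : String :=
  PySem.Str.join "\n" (pvBGreedy max_chars (pvBDedup PySem.Set.empty [] lines) [] 0)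

-- ===== PRECONDITION & SPEC =====
def Spec_compact_lines_py (lines : List String) (max_chars : Int) (out : String) : Prop := out = compact_lines_py_alt lines max_chars
instance (lines : List String) (max_chars : Int) (out : String) : Decidable (Spec_compact_lines_py lines max_chars out) := by unfold Spec_compact_lines_py; infer_instance

-- ===== CLAIM (what is proved, stated in full; the proofs are below) =====
def Claim_equal_compact_lines_py : Prop := ∀ (lines : List String) (max_chars : Int), Dom_compact_lines_py lines max_chars → Spec_compact_lines_py lines max_chars (compact_lines_py lines max_chars)

-- ===== LEMMAS AND PROOFS =====

-- The dedup pass's accumulator is a plain prefix of its output.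
theorem pvBDedup_append : ∀ (ls : List String) (seen u : List String),
    pvBDedup seen u ls = u ++ pvBDedup seen [] ls := by
  intro ls
  induction ls with
  | nil => intro seen u; simp [pvBDedup]
  | cons l rest ih =>
    intro seen u
    by_cases h : (PySem.Str.strip (if l == "" then "" else l) != ""
        && !(PySem.Set.contains seen (PySem.Str.strip (if l == "" then "" else l)))) = true
    · simp only [pvBDedup, h, if_pos]
      rw [ih _ (u ++ [_]), ih _ ([] ++ [_])]
      simp
    · simp only [pvBDedup, h, if_neg, Bool.false_eq_true, not_false_eq_true]
      exact ih seen u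

-- Core invariant: A's interleaved loop from state (kept, total) equals B's greedy pass run on
-- the lines deduplicated against 'kept', from the same state.
theorem pv_main (mc : Int) : ∀ (ls kept : List String) (total : Int),
    pvALoop mc ls kept total = pvBGreedy mc (pvBDedup kept [] ls) kept total := by
  intro ls
  induction ls with
  | nil => intro kept total; simp [pvALoop, pvBDedup, pvBGreedy]
  | cons l rest ih =>
    intro kept total
    simp only [pvALoop, pvBDedup]
    set t := PySem.Str.strip (if l == "" then "" else l) with ht
    by_cases h : (t == "" || kept.contains t) = true
    · have h2 : (t != "" && !(PySem.Set.contains kept t)) = false := by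
        show (t != "" && !(kept.contains t)) = false
        rcases Bool.or_eq_true_iff.mp h with h' | h'
        · simp [bne, h']
        · simp [List.contains_eq_mem] at h'
          simp [h']
      rw [if_pos h, if_neg (by rw [h2]; exact Bool.false_ne_true)]
      exact ih kept total
    · have h1 : (t == "") = false := by cases hc : (t == "") <;> simp_all
      have hcont : kept.contains t = false := by cases hc : kept.contains t <;> simp_all
      have h2 : (t != "" && !(PySem.Set.contains kept t)) = true := by
        show (t != "" && !(kept.contains t)) = true
        simp [bne, h1]
        simp only [List.contains_eq_mem, decide_eq_false_iff_not] at hcont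
        exact hcont
      have hadd : PySem.Set.add kept t = kept ++ [t] := by
        simp only [PySem.Set.add]
        rw [if_neg]
        show ¬ kept.contains t = true
        rw [hcont]
        exact Bool.false_ne_true
      rw [if_neg h, if_pos h2, hadd]
      simp only [List.nil_append]
      rw [pvBDedup_append rest (kept ++ [t]) [t], List.singleton_append]
      simp only [pvBGreedy]
      by_cases hb : (!kept.isEmpty && decide (total + (PySem.Str.len t + (if kept.isEmpty then (0:Int) else 1)) > mc)) = true
      · rw [if_pos hb, if_pos hb]
      · rw [if_neg hb, if_neg hb]
        exact ih (kept ++ [t]) _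

-- ===== VERDICT (by name: the statement is the Claim_ definition above) =====
theorem compact_lines_py_spec : Claim_equal_compact_lines_py := by
  intro lines max_chars _
  show compact_lines_py lines max_chars = compact_lines_py_alt lines max_chars
  unfold compact_lines_py compact_lines_py_alt
  rw [pv_main max_chars lines [] 0]
  rfl
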